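-- pv_equiv track=rewrite | github.com/liuliuli302/TFVSN | samples_builder.py | _get_clips_jump
-- ===== SOURCE A (Python) =====
-- def _get_clips_jump(picks, num_seg=5):
--     """将picks划分为n段，之后针对每段跳帧取clip"""
--     num_samples = len(picks) // num_seg
--     reminder = len(picks) % num_samples
--     clips = []
--     for i in range(num_samples):
--         indices = []
--         for j in range(num_seg):
--             indices.append(i+j*num_samples)
--         clips.append([picks[idx] for idx in indices])
--     return clips, reminder
-- ===== SOURCE B (Python) =====
-- def _get_clips_jump(picks, num_seg=5):
--     """将picks划分为n段，之后针对每段跳帧取clip"""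
--     num_samples = len(picks) // num_seg
--     reminder = len(picks) % num_samples
--     total = num_samples * num_seg
--     clips = [picks[i:total:num_samples] for i in range(num_samples)]
--     return clips, reminder
-- ===== Notes on version B (the rewrite author's own statement) =====
-- stated objective: faster
-- what changed: Replaces A's nested loops (build an index list per clip, then gather picks[idx] one element at a time) with a single comprehension taking one strided slice picks[i:num_samples*num_seg:num_samples] per clip; the inner Python-level loop disappears into C-level slicing.
import Mathlib
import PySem

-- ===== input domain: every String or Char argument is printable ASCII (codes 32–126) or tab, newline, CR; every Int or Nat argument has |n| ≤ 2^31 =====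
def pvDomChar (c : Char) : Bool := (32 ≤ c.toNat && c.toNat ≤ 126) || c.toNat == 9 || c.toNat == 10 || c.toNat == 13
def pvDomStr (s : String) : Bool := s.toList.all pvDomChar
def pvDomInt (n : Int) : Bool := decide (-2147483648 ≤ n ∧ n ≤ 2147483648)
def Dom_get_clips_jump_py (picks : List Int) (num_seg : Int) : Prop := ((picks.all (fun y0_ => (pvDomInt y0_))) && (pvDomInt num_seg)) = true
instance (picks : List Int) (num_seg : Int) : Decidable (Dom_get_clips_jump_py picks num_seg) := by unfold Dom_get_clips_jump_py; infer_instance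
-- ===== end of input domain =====

-- B replaces A's nested index-building loops by one comprehension of strided slices
-- picks[i:num_samples*num_seg:num_samples] (objective: faster, constant factor).

-- ===== PORT A =====
def get_clips_jump_py (picks : List Int) (num_seg : Int) : List (List Int) × Int :=
  let num_samples := PySem.Int.floordiv (picks.length : Int) num_seg
  let reminder := PySem.Int.mod (picks.length : Int) num_samples
  let clips := (PySem.List.pyRange 0 num_samples 1).foldl (fun clips i =>
    let indices := (PySem.List.pyRange 0 num_seg 1).foldl (fun inds j => inds ++ [i + j * num_samples]) []
    clips ++ [indices.map (fun idx => PySem.List.pyGetD picks idx 0)]) []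
  (clips, reminder)

-- ===== PORT B =====
def get_clips_jump_py_alt (picks : List Int) (num_seg : Int) : List (List Int) × Int :=
  let num_samples := PySem.Int.floordiv (picks.length : Int) num_seg
  let reminder := PySem.Int.mod (picks.length : Int) num_samples
  let total := num_samples * num_seg
  let clips := (PySem.List.pyRange 0 num_samples 1).map (fun i =>
    (PySem.List.slice? picks (some i) (some total) num_samples).getD [])
  (clips, reminder)

-- ===== PRECONDITION & SPEC =====
-- Pre_ excludes exactly the inputs where Python A raises ZeroDivisionError:
-- num_seg == 0 (in len(picks)//num_seg) or len(picks)//num_seg == 0 (in the '%').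
def Pre_get_clips_jump_py (picks : List Int) (num_seg : Int) : Prop :=
  num_seg ≠ 0 ∧ PySem.Int.floordiv (picks.length : Int) num_seg ≠ 0
instance (picks : List Int) (num_seg : Int) : Decidable (Pre_get_clips_jump_py picks num_seg) := by unfold Pre_get_clips_jump_py; infer_instance

def pvWitness_get_clips_jump_py : List Int × Int := ([1, 2, 3, 4, 5, 6], 3)

def Spec_get_clips_jump_py (picks : List Int) (num_seg : Int) (out : List (List Int) × Int) : Prop := out = get_clips_jump_py_alt picks num_seg
instance (picks : List Int) (num_seg : Int) (out : List (List Int) × Int) : Decidable (Spec_get_clips_jump_py picks num_seg out) := by unfold Spec_get_clips_jump_py; infer_instance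

-- ===== CLAIM (what is proved, stated in full; the proofs are below) =====
def Claim_equal_get_clips_jump_py : Prop := ∀ (picks : List Int) (num_seg : Int), Dom_get_clips_jump_py picks num_seg → Pre_get_clips_jump_py picks num_seg → Spec_get_clips_jump_py picks num_seg (get_clips_jump_py picks num_seg)

-- ===== LEMMAS AND PROOFS =====

theorem pv_filterMap_eq_map_of_mem {α β : Type} {l : List α} {f : α → Option β} {g : α → β}
    (h : ∀ x ∈ l, f x = some (g x)) : l.filterMap f = l.map g := by
  induction l with
  | nil => simp
  | cons a t ih => simp_all

theorem pv_foldl_append_singleton {α β : Type} (l : List α) (f : α → β) (acc : List β) :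
    l.foldl (fun acc x => acc ++ [f x]) acc = acc ++ l.map f := by
  induction l generalizing acc with
  | nil => simp
  | cons a t ih => simp [ih]

-- the inner clip: A's gather over indices equals B's strided slice, for 0 ≤ i < ns
theorem pv_clip_eq (picks : List Int) (num_seg ns i : Int)
    (hns : 1 ≤ ns) (hseg : 1 ≤ num_seg) (htot : ns * num_seg ≤ (picks.length : Int))
    (hi0 : 0 ≤ i) (hi : i < ns) :
    ((PySem.List.pyRange 0 num_seg 1).foldl (fun inds j => inds ++ [i + j * ns]) []).map
        (fun idx => PySem.List.pyGetD picks idx 0)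
      = (PySem.List.slice? picks (some i) (some (ns * num_seg)) ns).getD [] := by
  have hlen : (0:Int) ≤ (picks.length : Int) := by positivity
  -- left side: map over range
  rw [pv_foldl_append_singleton, List.nil_append, List.map_map, PySem.List.pyRange_one,
    List.map_map]
  -- right side: unfold slice?
  have hstep : ns ≠ 0 := by omega
  unfold PySem.List.slice? PySem.List.sliceIndices
  simp only [if_neg hstep]
  have hns' : ¬ ns < 0 := by omega
  have hi_le : i ≤ (picks.length : Int) := by nlinarith
  have htot0 : (0:Int) ≤ ns * num_seg := by positivity
  simp only [if_neg hns', min_def]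
  rw [if_neg (by omega : ¬ i < 0), if_neg (by omega : ¬ ns * num_seg < 0)]
  rw [if_pos hi_le, if_pos htot]
  have hilt : i < ns * num_seg := by nlinarith
  rw [if_pos (by omega : 0 < ns), if_pos hilt]
  -- count = num_seg
  have hcount : ((ns * num_seg - i + ns - 1) / ns) = num_seg := by
    have h1 : ns * num_seg - i + ns - 1 = (ns - 1 - i) + num_seg * ns := by ring
    rw [h1, Int.add_mul_ediv_right _ _ hstep,
      Int.ediv_eq_zero_of_lt (by omega) (by omega), zero_add]
  rw [hcount]
  -- both are maps over List.range num_seg.toNat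
  have hmem : ∀ k ∈ List.range num_seg.toNat,
      picks[(i + ns * (k : Int)).toNat]? =
        some (PySem.List.pyGetD picks (i + (0 + (k : Int)) * ns) 0) := by
    intro k hk
    rw [List.mem_range] at hk
    have hki : ((k : Int)) < num_seg := by omega
    have h0 : (0:Int) ≤ i + (0 + (k : Int)) * ns := by nlinarith
    have h1 : i + (0 + (k : Int)) * ns < (picks.length : Int) := by nlinarith
    rw [show i + ns * (k : Int) = i + (0 + (k : Int)) * ns from by ring]
    rw [PySem.List.pyGetD_eq_getElem picks 0 h0 h1, List.getElem?_eq_getElem (by omega)]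
  rw [pv_filterMap_eq_map_of_mem hmem]
  simp only [Option.getD_some, sub_zero]
  apply List.map_congr_left
  intro k _
  simp

-- ===== VERDICT (by name: the statement is the Claim_ definition above) =====
theorem get_clips_jump_py_spec : Claim_equal_get_clips_jump_py := by
  intro picks num_seg _ hpre
  obtain ⟨hseg, hns⟩ := hpre
  unfold Spec_get_clips_jump_py get_clips_jump_py get_clips_jump_py_alt
  set ns := PySem.Int.floordiv (picks.length : Int) num_seg with hnsdef
  simp only [Prod.mk.injEq, and_true]
  by_cases hpos : 1 ≤ ns
  · -- num_seg must be positive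
    have hlen : (0:Int) ≤ (picks.length : Int) := by positivity
    have hsegpos : 1 ≤ num_seg := by
      by_contra h
      have hneg : num_seg ≤ -1 := by omega
      have : ns ≤ 0 := by
        rw [hnsdef]
        unfold PySem.Int.floordiv
        exact Int.fdiv_nonpos_of_nonneg_of_nonpos hlen (by omega)
      omega
    have htot : ns * num_seg ≤ (picks.length : Int) := by
      have := (PySem.Int.le_floordiv_iff_mul_le (a := (picks.length : Int))
        (b := num_seg) (q := ns) (by omega)).mp (le_of_eq hnsdef)
      exact this
    rw [pv_foldl_append_singleton, List.nil_append]
    apply List.map_congr_left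
    intro i hi
    rw [PySem.List.mem_pyRange_one] at hi
    exact pv_clip_eq picks num_seg ns i hpos hsegpos htot hi.1 hi.2
  · -- ns ≤ -1 : both ranges are empty
    have hle : ns ≤ 0 := by omega
    rw [PySem.List.pyRange_one_eq_nil hle]
    simp
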